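-- pv_equiv track=rewrite | github.com/AI-HHMI/miao | src/miao/axes.py | map_patch_size_to_input
-- ===== SOURCE A (Python) =====
-- def compute_permutation(input_axes: str, output_axes: str) -> tuple[int, ...]:
--     """Return the permutation tuple to reorder dimensions from input to output order.
--
--     Example: input_axes="zyx", output_axes="xyz" -> (2, 1, 0)
--     """
--     if set(input_axes) != set(output_axes):
--         raise ValueError(
--             f"input_axes {input_axes!r} and output_axes {output_axes!r} "
--             "must contain the same set of axis characters"
--         )
--     if len(input_axes) != len(set(input_axes)):
--         raise ValueError(f"input_axes {input_axes!r} contains duplicate characters")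
--     if len(output_axes) != len(set(output_axes)):
--         raise ValueError(f"output_axes {output_axes!r} contains duplicate characters")
--
--     input_index = {char: i for i, char in enumerate(input_axes)}
--     return tuple(input_index[char] for char in output_axes)
--
-- def invert_permutation(perm: tuple[int, ...] | list[int]) -> list[int]:
--     """Return the inverse permutation: inv[perm[i]] == i for all i."""
--     inv = [0] * len(perm)
--     for i, p in enumerate(perm):
--         inv[p] = i
--     return inv
--
-- def map_patch_size_to_input(
--     patch_size: list[int],
--     input_axes: str,
--     output_axes: str,
-- ) -> list[int]:
--     """Map patch_size (defined in output_axes order) back to input_axes order.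
--
--     This is needed so we can slice the correct shape from the stored array
--     before transposing to output order.
--     """
--     if input_axes == output_axes:
--         return list(patch_size)
--     perm = compute_permutation(output_axes, input_axes)
--     inv = invert_permutation(perm)
--     return [patch_size[i] for i in inv]
-- ===== SOURCE B (Python) =====
-- def map_patch_size_to_input(
--     patch_size: list[int],
--     input_axes: str,
--     output_axes: str,
-- ) -> list[int]:
--     """Map patch_size (defined in output_axes order) back to input_axes order."""
--     if input_axes == output_axes:
--         return list(patch_size)
--     if set(input_axes) != set(output_axes):
--         raise ValueError(
--             f"input_axes {input_axes!r} and output_axes {output_axes!r} "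
--             "must contain the same set of axis characters"
--         )
--     if len(input_axes) != len(set(input_axes)):
--         raise ValueError(f"input_axes {input_axes!r} contains duplicate characters")
--     if len(output_axes) != len(set(output_axes)):
--         raise ValueError(f"output_axes {output_axes!r} contains duplicate characters")
--     input_index = {char: i for i, char in enumerate(input_axes)}
--     return [patch_size[input_index[char]] for char in output_axes]
-- ===== Notes on version B (the rewrite author's own statement) =====
-- stated objective: simpler
-- what changed: B drops both helper functions: instead of computing a permutation over the axes and then inverting it with an index-write pass, it builds one dict from each input-axis character to its position and gathers patch_size through it in a single comprehension.
import Mathlib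
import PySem

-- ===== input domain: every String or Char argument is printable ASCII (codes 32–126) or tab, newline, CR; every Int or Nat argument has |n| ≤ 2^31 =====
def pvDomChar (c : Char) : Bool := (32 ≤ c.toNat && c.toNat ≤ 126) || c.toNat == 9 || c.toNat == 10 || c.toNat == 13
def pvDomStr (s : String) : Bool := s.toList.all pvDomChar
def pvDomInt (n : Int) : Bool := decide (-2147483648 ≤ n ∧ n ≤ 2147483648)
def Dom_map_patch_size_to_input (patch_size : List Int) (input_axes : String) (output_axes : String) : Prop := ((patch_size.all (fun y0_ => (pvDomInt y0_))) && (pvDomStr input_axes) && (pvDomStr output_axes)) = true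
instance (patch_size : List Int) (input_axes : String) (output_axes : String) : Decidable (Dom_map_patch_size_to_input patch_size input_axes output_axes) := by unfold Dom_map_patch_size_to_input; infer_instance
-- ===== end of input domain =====

-- B replaces A's permutation-then-inversion pipeline by one char→position dict and a single gather;
-- objective: simpler (equality of RETURN values; neither version mutates its arguments).

-- ===== PORT A =====
-- the dict comprehension {char: i for i, char in enumerate(axes)}
def pvIndexDict (axes : List Char) : PySem.Dict Char Int :=
  (PySem.List.enumerate axes).foldl (fun d p => d.insert p.2 p.1) PySem.Dict.empty

-- compute_permutation: the three ValueError raises become `none` (excluded by Pre_).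
-- Past the first check the two axis sets are equal, so input_index[char] cannot KeyError:
-- `getD … 0` is exact on that branch.
def pvComputePermutation (input_axes : List Char) (output_axes : List Char) : Option (List Int) :=
  if !(PySem.Set.equal (PySem.Set.ofList input_axes) (PySem.Set.ofList output_axes)) then none
  else if input_axes.length ≠ (PySem.Set.ofList input_axes).length then none
  else if output_axes.length ≠ (PySem.Set.ofList output_axes).length then none
  else some (output_axes.map (fun c => (pvIndexDict input_axes).getD c 0))

-- invert_permutation: inv = [0]*len(perm); for i, p in enumerate(perm): inv[p] = i
-- pySetD is exact here: under Pre_ every p is a valid nonnegative index (else A raised earlier).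
def pvInvertPermutation (perm : List Int) : List Int :=
  (PySem.List.enumerate perm).foldl (fun inv p => PySem.List.pySetD inv p.2 p.1)
    (List.replicate perm.length 0)

def map_patch_size_to_input (patch_size : List Int) (input_axes : String) (output_axes : String) : List Int :=
  if input_axes == output_axes then patch_size
  else
    match pvComputePermutation output_axes.toList input_axes.toList with
    | none => []  -- A raises ValueError here; excluded by Pre_
    | some perm =>
      -- patch_size[i] can IndexError only when len(patch_size) < len(axes); excluded by Pre_
      (pvInvertPermutation perm).map (fun i => PySem.List.pyGetD patch_size i 0)

-- ===== PORT B =====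
def map_patch_size_to_input_alt (patch_size : List Int) (input_axes : String) (output_axes : String) : List Int :=
  if input_axes == output_axes then patch_size
  else if !(PySem.Set.equal (PySem.Set.ofList input_axes.toList) (PySem.Set.ofList output_axes.toList)) then []
  else if input_axes.toList.length ≠ (PySem.Set.ofList input_axes.toList).length then []
  else if output_axes.toList.length ≠ (PySem.Set.ofList output_axes.toList).length then []
  else
    -- B raises the same three ValueErrors as A (branches above, excluded by Pre_);
    -- input_index[char] cannot KeyError since the sets are equal, so getD is exact,
    -- and patch_size[…] can IndexError only when patch_size is too short (excluded by Pre_).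
    let input_index : PySem.Dict Char Int :=
      (PySem.List.enumerate input_axes.toList).foldl (fun d p => d.insert p.2 p.1) PySem.Dict.empty
    output_axes.toList.map (fun c => PySem.List.pyGetD patch_size (input_index.getD c 0) 0)

-- ===== PRECONDITION & SPEC =====
-- Pre_ admits exactly the inputs on which A returns: either the identity fast path, or
-- duplicate-free axis strings over the same character set with patch_size long enough
-- (otherwise A raises ValueError / IndexError).
def Pre_map_patch_size_to_input (patch_size : List Int) (input_axes : String) (output_axes : String) : Prop :=
  input_axes = output_axes ∨
    (input_axes.toList.Nodup ∧ output_axes.toList.Nodup ∧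
     (∀ c ∈ input_axes.toList, c ∈ output_axes.toList) ∧
     (∀ c ∈ output_axes.toList, c ∈ input_axes.toList) ∧
     input_axes.toList.length ≤ patch_size.length)
instance (patch_size : List Int) (input_axes : String) (output_axes : String) : Decidable (Pre_map_patch_size_to_input patch_size input_axes output_axes) := by unfold Pre_map_patch_size_to_input; infer_instance

def pvWitness_map_patch_size_to_input : List Int × String × String := ([1, 2, 3], "zyx", "zyx")

def Spec_map_patch_size_to_input (patch_size : List Int) (input_axes : String) (output_axes : String) (out : List Int) : Prop := out = map_patch_size_to_input_alt patch_size input_axes output_axes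
instance (patch_size : List Int) (input_axes : String) (output_axes : String) (out : List Int) : Decidable (Spec_map_patch_size_to_input patch_size input_axes output_axes out) := by unfold Spec_map_patch_size_to_input; infer_instance

-- ===== CLAIM (what is proved, stated in full; the proofs are below) =====
def Claim_equal_map_patch_size_to_input : Prop := ∀ (patch_size : List Int) (input_axes : String) (output_axes : String), Dom_map_patch_size_to_input patch_size input_axes output_axes → Pre_map_patch_size_to_input patch_size input_axes output_axes → Spec_map_patch_size_to_input patch_size input_axes output_axes (map_patch_size_to_input patch_size input_axes output_axes)

-- ===== LEMMAS AND PROOFS =====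

-- the enumerate-insert fold (both ports' dict) looks up to start + first index, for Nodup keys
theorem pv_getD_indexFold (l : List Char) (s : Int) (d : PySem.Dict Char Int) (c : Char)
    (hn : l.Nodup) :
    ((PySem.List.enumerate l s).foldl (fun d p => d.insert p.2 p.1) d).getD c 0
      = if c ∈ l then s + (l.idxOf c : Int) else d.getD c 0 := by
  induction l generalizing s d with
  | nil => simp [PySem.List.enumerate]
  | cons x xs ih =>
    rw [PySem.List.enumerate_cons, List.foldl_cons, ih (s + 1) _ hn.of_cons]
    by_cases hx : c = x
    · subst hx
      have hc : c ∉ xs := (List.nodup_cons.mp hn).1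
      simp [hc]
    · by_cases hm : c ∈ xs
      · have hx' : x ≠ c := fun h => hx h.symm
        have : (x :: xs).idxOf c = xs.idxOf c + 1 := by
          simp [hx']
        simp only [hm, if_true, List.mem_cons, hx, false_or, this]
        push_cast; ring
      · simp [hm, hx, PySem.Dict.getD_insert, List.mem_cons]

-- the invert_permutation fold: element k of the result
theorem pv_invert_getElem? (perm : List Int) (s : Int) (acc : List Int) (k : Nat)
    (hv : ∀ i ∈ perm, 0 ≤ i ∧ i.toNat < acc.length) (hnd : perm.Nodup) :
    ((PySem.List.enumerate perm s).foldl (fun inv p => PySem.List.pySetD inv p.2 p.1) acc)[k]?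
      = if (k : Int) ∈ perm then some (s + (perm.idxOf (k : Int) : Int)) else acc[k]? := by
  induction perm generalizing s acc with
  | nil => simp [PySem.List.enumerate]
  | cons i perm ih =>
    have hi := hv i (List.mem_cons_self)
    rw [PySem.List.enumerate_cons, List.foldl_cons, PySem.List.pySetD_of_nonneg _ _ hi.1,
      ih (s + 1) _ (by
        intro j hj
        simpa [List.length_set] using hv j (List.mem_cons_of_mem _ hj)) hnd.of_cons]
    by_cases hm : (k : Int) ∈ perm
    · have hne : (k : Int) ≠ i := fun h => (List.nodup_cons.mp hnd).1 (h ▸ hm)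
      have hne' : i ≠ (k : Int) := fun h => hne h.symm
      have : (i :: perm).idxOf (k : Int) = perm.idxOf (k : Int) + 1 := by
        simp [hne']
      simp only [hm, if_true, List.mem_cons, hne, false_or, this]
      push_cast; ring_nf
    · by_cases hki : (k : Int) = i
      · have hik : i.toNat = k := by omega
        simp only [hki, List.mem_cons, true_or, if_true, List.idxOf_cons_self,
          Nat.cast_zero, add_zero]
        rw [if_neg (by simpa [hki] using hm), List.getElem?_set, if_pos hik, if_pos hi.2]
      · have : i.toNat ≠ k := by omega
        simp [hm, hki, this, List.mem_cons]

-- ===== VERDICT (by name: the statement is the Claim_ definition above) =====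
theorem map_patch_size_to_input_spec : Claim_equal_map_patch_size_to_input := by
  intro ps ia oa _ hpre
  unfold Spec_map_patch_size_to_input map_patch_size_to_input map_patch_size_to_input_alt
  rcases hpre with heq | ⟨hni, hno, hio, hoi, hlen⟩
  · simp [heq]
  by_cases hid : ia = oa
  · simp [hid]
  have hbeq : (ia == oa) = false := by
    simp [hid]
  rw [hbeq]
  simp only [Bool.false_eq_true, if_false]
  set li := ia.toList with hli
  set lo := oa.toList with hlo
  -- the three guards pass
  have hseteq : PySem.Set.equal (PySem.Set.ofList li) (PySem.Set.ofList lo) = true := by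
    rw [PySem.Set.equal_iff]
    intro c
    simp only [PySem.Set.mem_ofList]
    exact ⟨fun h => hio c h, fun h => hoi c h⟩
  have hseteq' : PySem.Set.equal (PySem.Set.ofList lo) (PySem.Set.ofList li) = true := by
    rw [PySem.Set.equal_iff]
    intro c
    simp only [PySem.Set.mem_ofList]
    exact ⟨fun h => hoi c h, fun h => hio c h⟩
  have hdi : PySem.Set.ofList li = li := PySem.Set.ofList_eq_self_of_nodup _ hni
  have hdo : PySem.Set.ofList lo = lo := PySem.Set.ofList_eq_self_of_nodup _ hno
  -- equal lengths
  have hfs : li.toFinset = lo.toFinset := by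
    ext c; simp only [List.mem_toFinset]; exact ⟨fun h => hio c h, fun h => hoi c h⟩
  have hlen_eq : li.length = lo.length := by
    rw [← List.toFinset_card_of_nodup hni, ← List.toFinset_card_of_nodup hno, hfs]
  unfold pvComputePermutation
  rw [hseteq, hseteq', hdi, hdo]
  simp only [Bool.not_true, Bool.false_eq_true, ne_eq,
    not_true_eq_false, if_false]
  -- A's permutation is c ↦ index of c in lo, over li
  have hpermA : li.map (fun c => (pvIndexDict lo).getD c 0)
      = li.map (fun c => (lo.idxOf c : Int)) := by
    apply List.map_congr_left
    intro c hc
    unfold pvIndexDict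
    rw [pv_getD_indexFold _ _ _ _ hno]
    simp [hio c hc]
  rw [hpermA]
  set perm : List Int := li.map (fun c => (lo.idxOf c : Int)) with hperm
  -- invert(perm) = [index of lo[k] in li]_k
  have hinv : pvInvertPermutation perm = lo.map (fun c => (li.idxOf c : Int)) := by
    have hvals : ∀ i ∈ perm, 0 ≤ i ∧ i.toNat < (List.replicate perm.length (0 : Int)).length := by
      intro i hi
      rw [hperm] at hi
      obtain ⟨c, hc, rfl⟩ := List.mem_map.mp hi
      have : lo.idxOf c < lo.length := List.idxOf_lt_length_of_mem (hio c hc)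
      constructor
      · exact Int.natCast_nonneg _
      · simp only [List.length_replicate, hperm, List.length_map, Int.toNat_natCast]
        omega
    have hndp : perm.Nodup := by
      rw [hperm]
      refine List.Nodup.map_on ?_ hni
      intro x hx y hy hxy
      have hx' := hio x hx
      have hy' := hio y hy
      have : lo.idxOf x = lo.idxOf y := by exact_mod_cast hxy
      calc x = lo[lo.idxOf x]'(List.idxOf_lt_length_of_mem hx') := (List.getElem_idxOf _).symm
        _ = lo[lo.idxOf y]'(List.idxOf_lt_length_of_mem hy') := by simp_rw [this]
        _ = y := List.getElem_idxOf _
    apply List.ext_getElem?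
    intro k
    unfold pvInvertPermutation
    rw [pv_invert_getElem? _ _ _ _ hvals hndp]
    by_cases hk : k < lo.length
    · have hmem : (k : Int) ∈ perm := by
        rw [hperm]
        refine List.mem_map.mpr ⟨lo[k], hoi _ (lo.getElem_mem hk), ?_⟩
        rw [List.Nodup.idxOf_getElem hno k hk]
      have hj : li.idxOf lo[k] < li.length := List.idxOf_lt_length_of_mem (hoi _ (lo.getElem_mem hk))
      have hpj : perm[li.idxOf lo[k]]? = some ((k : Int)) := by
        rw [hperm, List.getElem?_map, li.getElem?_eq_getElem hj]
        simp [List.getElem_idxOf, List.Nodup.idxOf_getElem hno k hk]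
      obtain ⟨hjlt, hpeq⟩ := List.getElem?_eq_some_iff.mp hpj
      have hidx : perm.idxOf ((k : Int)) = li.idxOf lo[k] := by
        conv_lhs => rw [← hpeq]
        exact List.Nodup.idxOf_getElem hndp _ _
      rw [if_pos hmem, hidx]
      rw [List.getElem?_map, lo.getElem?_eq_getElem hk]
      simp
    · have hmem : (k : Int) ∉ perm := by
        rw [hperm]
        intro hmem
        obtain ⟨c, hc, hck⟩ := List.mem_map.mp hmem
        have : lo.idxOf c < lo.length := List.idxOf_lt_length_of_mem (hio c hc)
        omega
      rw [if_neg hmem]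
      rw [List.getElem?_eq_none (by simpa [hperm, hlen_eq] using Nat.le_of_not_lt hk),
        List.getElem?_eq_none (by simpa using Nat.le_of_not_lt hk)]
  rw [hinv, List.map_map]
  apply List.map_congr_left
  intro c hc
  simp only [Function.comp_apply]
  congr 1
  rw [pv_getD_indexFold _ _ _ _ hni]
  simp [hoi c hc]
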